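-- pv_equiv track=rewrite | github.com/sonnyzxc/cospro_solutions | 1급/Python/6차/6차 1급 1_initial_code.py | solution
-- ===== SOURCE A (Python) =====
-- from collections import deque
--
-- def solution(n, garden):
--     queue = deque()
--     for i in range(n):
--         for j in range(n):
--             if garden[i][j] == 1:
--                 queue.append((i, j))
--
--     answer = 0
--     while queue:
--         for _ in range(len(queue)):
--             x, y = queue.popleft()
--             for dx, dy in [(1, 0), (-1, 0), (0, 1), (0, -1)]:
--                 nx, ny = x + dx, y + dy
--                 if 0 <= nx < n and 0 <= ny < n and garden[nx][ny] == 0: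
--                     garden[nx][ny] = 1
--                     queue.append((nx, ny))
--         if len(queue) == 0:
--             break
--         answer += 1
--     return answer
-- ===== SOURCE B (Python) =====
-- def solution(n, garden):
--     # Queue-free iterated dilation: each round does a full-grid scan collecting
--     # every 0-cell adjacent to a 1-cell, then marks them all simultaneously;
--     # the answer is the number of rounds that marked something.
--     # Mutates garden in place like the original (fills 0-cells with 1).
--     answer = 0
--     while True:
--         newly = [(i, j)
--                  for i in range(n) for j in range(n)
--                  if garden[i][j] == 0
--                  and any(0 <= x < n and 0 <= y < n and garden[x][y] == 1
--                          for x, y in ((i + 1, j), (i - 1, j), (i, j + 1), (i, j - 1)))]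
--         if not newly:
--             return answer
--         for i, j in newly:
--             garden[i][j] = 1
--         answer += 1
-- ===== Notes on version B (the rewrite author's own statement) =====
-- stated objective: alternative
-- what changed: Replaces the queue-based multi-source BFS by a queue-free iterated grid dilation: each round recomputes by a full-grid scan the set of 0-cells adjacent to a 1-cell and marks them all simultaneously, counting the rounds that marked something; garden is mutated in place with the same final contents.
import Mathlib
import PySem

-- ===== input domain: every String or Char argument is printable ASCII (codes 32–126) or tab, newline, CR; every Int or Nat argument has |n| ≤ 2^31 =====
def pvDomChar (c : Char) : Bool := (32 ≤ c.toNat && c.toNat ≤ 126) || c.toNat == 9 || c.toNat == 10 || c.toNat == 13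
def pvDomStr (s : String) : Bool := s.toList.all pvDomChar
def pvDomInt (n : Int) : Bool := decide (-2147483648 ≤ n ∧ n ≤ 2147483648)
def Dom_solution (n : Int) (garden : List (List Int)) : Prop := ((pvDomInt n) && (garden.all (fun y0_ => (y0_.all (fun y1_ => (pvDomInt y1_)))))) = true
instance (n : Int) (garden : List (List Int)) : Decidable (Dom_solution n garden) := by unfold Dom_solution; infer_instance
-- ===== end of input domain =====

-- B replaces A's queue-based multi-source BFS by a queue-free iterated grid dilation
-- (each round a full-grid scan collects every 0-cell adjacent to a 1-cell and marks
-- them all simultaneously, counting the rounds that marked something); both Pythons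
-- mutate `garden` in place with the same final contents, the equivalence proved here
-- is about the return value.

-- garden[x][y]: exact under Pre_solution (every access is in range there; outside,
-- Python raises IndexError and those inputs are excluded by Pre_solution; the default 1
-- makes out-of-range cells act as non-zero, which keeps the ports total).
def pvCell (g : List (List Int)) (x y : Int) : Int :=
  (PySem.List.pyGet? ((PySem.List.pyGet? g x).getD []) y).getD 1

-- garden[x][y] = 1 (only evaluated under the guard 0 ≤ x < n ∧ 0 ≤ y < n)
def pvSet (g : List (List Int)) (x y : Int) : List (List Int) :=
  g.set x.toNat (((PySem.List.pyGet? g x).getD []).set y.toNat 1)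

-- number of 0-cells: the termination measure of both loops
def pvZeros (g : List (List Int)) : Nat :=
  (g.map (fun r => r.countP (fun v => v == 0))).sum

-- termination helpers (cited by the ports' decreasing_by)
theorem pvCount_set_row (r : List Int) (j : Nat) (h : r[j]?.getD 1 = 0) :
    (r.set j 1).countP (fun v => v == 0) < r.countP (fun v => v == 0) := by
  induction r generalizing j with
  | nil => simp at h
  | cons a t ih =>
    cases j with
    | zero =>
      simp at h
      simp [h]
    | succ k =>
      simp at h
      have := ih k h
      simp [List.countP_cons]
      omega

theorem pvCount_set_row_le (r : List Int) (j : Nat) :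
    (r.set j 1).countP (fun v => v == 0) ≤ r.countP (fun v => v == 0) := by
  induction r generalizing j with
  | nil => simp
  | cons a t ih =>
    cases j with
    | zero => simp [List.countP_cons]
    | succ k =>
      have := ih k
      simp [List.countP_cons]
      omega

theorem pvZeros_set_aux (g : List (List Int)) (i : Nat) (r' row : List Int)
    (hg : g[i]? = some row)
    (hc : r'.countP (fun v => v == 0) < row.countP (fun v => v == 0)) :
    pvZeros (g.set i r') < pvZeros g := by
  induction g generalizing i with
  | nil => simp at hg
  | cons hd tl ih =>
    cases i with
    | zero =>
      simp at hg
      subst hg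
      simp [pvZeros]
      omega
    | succ k =>
      simp at hg
      have := ih k hg
      simp [pvZeros] at this ⊢
      omega

theorem pvZeros_set_aux_le (g : List (List Int)) (i : Nat) (r' row : List Int)
    (hg : g[i]? = some row)
    (hc : r'.countP (fun v => v == 0) ≤ row.countP (fun v => v == 0)) :
    pvZeros (g.set i r') ≤ pvZeros g := by
  induction g generalizing i with
  | nil => simp at hg
  | cons hd tl ih =>
    cases i with
    | zero =>
      simp at hg
      subst hg
      simp [pvZeros]
      omega
    | succ k =>
      simp at hg
      have := ih k hg
      simp [pvZeros] at this ⊢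
      omega

theorem pvZeros_set (g : List (List Int)) (x y : Int) (hx : 0 ≤ x) (hy : 0 ≤ y)
    (h : pvCell g x y = 0) : pvZeros (pvSet g x y) < pvZeros g := by
  unfold pvCell at h
  unfold pvSet
  rw [PySem.List.pyGet?_of_nonneg g hx] at h ⊢
  cases hrow : g[x.toNat]? with
  | none => rw [hrow] at h; simp [PySem.List.pyGet?] at h
  | some row =>
    rw [hrow] at h
    simp only [Option.getD_some] at h
    rw [PySem.List.pyGet?_of_nonneg row hy] at h
    exact pvZeros_set_aux g x.toNat _ row hrow (pvCount_set_row row y.toNat h)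

theorem pvZeros_set_le (g : List (List Int)) (x y : Int) (hx : 0 ≤ x) :
    pvZeros (pvSet g x y) ≤ pvZeros g := by
  unfold pvSet
  rw [PySem.List.pyGet?_of_nonneg g hx]
  cases hrow : g[x.toNat]? with
  | none =>
    rw [List.set_eq_of_length_le (List.getElem?_eq_none_iff.mp hrow)]
  | some row =>
    simp only [Option.getD_some]
    exact pvZeros_set_aux_le g x.toNat _ row hrow (pvCount_set_row_le row y.toNat)

-- ===== PORT A =====
-- inner 'for dx, dy in [(1,0),(-1,0),(0,1),(0,-1)]' of one popped cell
def stepDirs (n x y : Int) : List (Int × Int) → List (List Int) → List (List Int) × List (Int × Int)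
  | [], g => (g, [])
  | dd :: ds, g =>
    if 0 ≤ x + dd.1 ∧ x + dd.1 < n ∧ 0 ≤ y + dd.2 ∧ y + dd.2 < n ∧ pvCell g (x + dd.1) (y + dd.2) = 0 then
      let r := stepDirs n x y ds (pvSet g (x + dd.1) (y + dd.2))
      (r.1, (x + dd.1, y + dd.2) :: r.2)
    else stepDirs n x y ds g

def stepCellA (n : Int) (g : List (List Int)) (x y : Int) : List (List Int) × List (Int × Int) :=
  stepDirs n x y [(1, 0), (-1, 0), (0, 1), (0, -1)] g

-- rewriting equations for stepDirs
theorem stepDirs_cons_pos (n x y : Int) (dd : Int × Int) (ds : List (Int × Int)) (g : List (List Int))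
    (h : 0 ≤ x + dd.1 ∧ x + dd.1 < n ∧ 0 ≤ y + dd.2 ∧ y + dd.2 < n ∧ pvCell g (x + dd.1) (y + dd.2) = 0) :
    stepDirs n x y (dd :: ds) g =
      ((stepDirs n x y ds (pvSet g (x + dd.1) (y + dd.2))).1,
       (x + dd.1, y + dd.2) :: (stepDirs n x y ds (pvSet g (x + dd.1) (y + dd.2))).2) := by
  show (if 0 ≤ x + dd.1 ∧ x + dd.1 < n ∧ 0 ≤ y + dd.2 ∧ y + dd.2 < n ∧ pvCell g (x + dd.1) (y + dd.2) = 0 then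
      ((stepDirs n x y ds (pvSet g (x + dd.1) (y + dd.2))).1,
       (x + dd.1, y + dd.2) :: (stepDirs n x y ds (pvSet g (x + dd.1) (y + dd.2))).2)
    else stepDirs n x y ds g) = _
  rw [if_pos h]

theorem stepDirs_cons_neg (n x y : Int) (dd : Int × Int) (ds : List (Int × Int)) (g : List (List Int))
    (h : ¬(0 ≤ x + dd.1 ∧ x + dd.1 < n ∧ 0 ≤ y + dd.2 ∧ y + dd.2 < n ∧ pvCell g (x + dd.1) (y + dd.2) = 0)) :
    stepDirs n x y (dd :: ds) g = stepDirs n x y ds g := by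
  show (if 0 ≤ x + dd.1 ∧ x + dd.1 < n ∧ 0 ≤ y + dd.2 ∧ y + dd.2 < n ∧ pvCell g (x + dd.1) (y + dd.2) = 0 then
      ((stepDirs n x y ds (pvSet g (x + dd.1) (y + dd.2))).1,
       (x + dd.1, y + dd.2) :: (stepDirs n x y ds (pvSet g (x + dd.1) (y + dd.2))).2)
    else stepDirs n x y ds g) = _
  rw [if_neg h]


theorem pvZeros_stepDirs (n x y : Int) : ∀ (ds : List (Int × Int)) (g : List (List Int)),
    pvZeros (stepDirs n x y ds g).1 + (stepDirs n x y ds g).2.length ≤ pvZeros g := by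
  intro ds
  induction ds with
  | nil => intro g; exact Nat.le_refl _
  | cons dd ds ih =>
    intro g
    by_cases hc : 0 ≤ x + dd.1 ∧ x + dd.1 < n ∧ 0 ≤ y + dd.2 ∧ y + dd.2 < n ∧ pvCell g (x + dd.1) (y + dd.2) = 0
    · rw [stepDirs_cons_pos n x y dd ds g hc]
      dsimp only
      have hset := pvZeros_set g (x + dd.1) (y + dd.2) hc.1 hc.2.2.1 hc.2.2.2.2
      have := ih (pvSet g (x + dd.1) (y + dd.2))
      rw [List.length_cons]
      omega
    · rw [stepDirs_cons_neg n x y dd ds g hc]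
      exact ih g

-- 'for _ in range(len(queue)): popleft; expand' — one synchronous round
def stepLevelA (n : Int) : List (List Int) → List (Int × Int) → List (List Int) × List (Int × Int)
  | g, [] => (g, [])
  | g, c :: cs =>
    let r1 := stepCellA n g c.1 c.2
    let r := stepLevelA n r1.1 cs
    (r.1, r1.2 ++ r.2)

theorem pvZeros_stepLevel (n : Int) : ∀ (cs : List (Int × Int)) (g : List (List Int)),
    pvZeros (stepLevelA n g cs).1 + (stepLevelA n g cs).2.length ≤ pvZeros g := by
  intro cs
  induction cs with
  | nil => intro g; exact Nat.le_refl _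
  | cons c cs ih =>
    intro g
    have h1 := pvZeros_stepDirs n c.1 c.2 [(1, 0), (-1, 0), (0, 1), (0, -1)] g
    have h2 := ih (stepCellA n g c.1 c.2).1
    have hstep : stepLevelA n g (c :: cs)
        = ((stepLevelA n (stepCellA n g c.1 c.2).1 cs).1,
           (stepCellA n g c.1 c.2).2 ++ (stepLevelA n (stepCellA n g c.1 c.2).1 cs).2) := rfl
    rw [hstep]
    dsimp only
    rw [List.length_append]
    have h1' : pvZeros (stepCellA n g c.1 c.2).1 + (stepCellA n g c.1 c.2).2.length ≤ pvZeros g := h1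
    omega

-- termination helper for loopA (cited in its decreasing_by)
theorem loopA_dec (n : Int) (g : List (List Int)) (q : List (Int × Int)) (hq : ¬q = []) :
    pvZeros (stepLevelA n g q).1 + (stepLevelA n g q).2.length < pvZeros g + q.length := by
  have h := pvZeros_stepLevel n q g
  have hl : 1 ≤ q.length := by
    cases q with
    | nil => exact absurd rfl hq
    | cons a t => simp
  omega

-- 'while queue: <round>; if len(queue)==0: break; answer += 1'
def loopA (n : Int) (g : List (List Int)) (q : List (Int × Int)) (ans : Int) : Int :=
  if hq : q = [] then ans
  else
    let r := stepLevelA n g q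
    if r.2 = [] then ans
    else loopA n r.1 r.2 (ans + 1)
termination_by pvZeros g + q.length
decreasing_by exact loopA_dec n g q hq

-- the two nested 'for i in range(n): for j in range(n): if garden[i][j]==1: append'
def seedA (n : Int) (g : List (List Int)) : List (Int × Int) :=
  (PySem.List.pyRange 0 n 1).foldl (fun acc i =>
    (PySem.List.pyRange 0 n 1).foldl (fun acc2 j =>
      if pvCell g i j == 1 then acc2 ++ [(i, j)] else acc2) acc) []

def solution (n : Int) (garden : List (List Int)) : Int :=
  loopA n garden (seedA n garden) 0

-- ===== PORT B =====
-- 'any(0 <= x < n and 0 <= y < n and garden[x][y] == 1 for x, y in ((i+1,j),(i-1,j),(i,j+1),(i,j-1)))'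
def hasNbrOne (n : Int) (g : List (List Int)) (i j : Int) : Bool :=
  [(i + 1, j), (i - 1, j), (i, j + 1), (i, j - 1)].any (fun c =>
    decide (0 ≤ c.1) && decide (c.1 < n) && decide (0 ≤ c.2) && decide (c.2 < n) && (pvCell g c.1 c.2 == 1))

-- the round's comprehension: all 0-cells currently adjacent to a 1-cell, row-major
def newlyB (n : Int) (g : List (List Int)) : List (Int × Int) :=
  (PySem.List.pyRange 0 n 1).flatMap (fun i =>
    ((PySem.List.pyRange 0 n 1).filter (fun j => pvCell g i j == 0 && hasNbrOne n g i j)).map (fun j => (i, j)))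

-- 'for i, j in newly: garden[i][j] = 1'
def markB (g : List (List Int)) (cs : List (Int × Int)) : List (List Int) :=
  cs.foldl (fun h c => pvSet h c.1 c.2) g

-- termination helpers for loopB (cited in its decreasing_by)
theorem mem_newlyB_nonneg (n : Int) (g : List (List Int)) (c : Int × Int)
    (h : c ∈ newlyB n g) : 0 ≤ c.1 ∧ 0 ≤ c.2 ∧ pvCell g c.1 c.2 = 0 := by
  unfold newlyB at h
  simp only [List.mem_flatMap, List.mem_map, List.mem_filter, PySem.List.mem_pyRange_one] at h
  obtain ⟨i, hi, j, ⟨hj, hcond⟩, hc⟩ := h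
  subst hc
  simp only [Bool.and_eq_true, beq_iff_eq] at hcond
  exact ⟨hi.1, hj.1, hcond.1⟩

theorem pvZeros_markB_le (cs : List (Int × Int)) : ∀ (g : List (List Int)),
    (∀ c ∈ cs, 0 ≤ c.1) → pvZeros (markB g cs) ≤ pvZeros g := by
  induction cs with
  | nil => intro g _; simp [markB]
  | cons c cs ih =>
    intro g h
    have h1 := pvZeros_set_le g c.1 c.2 (h c (by simp))
    have h2 := ih (pvSet g c.1 c.2) (fun c' hc' => h c' (List.mem_cons_of_mem _ hc'))
    simp only [markB, List.foldl_cons] at *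
    omega

theorem loopB_dec (n : Int) (g : List (List Int)) (hq : ¬newlyB n g = []) :
    pvZeros (markB g (newlyB n g)) < pvZeros g := by
  cases hnew : newlyB n g with
  | nil => exact absurd hnew hq
  | cons c cs =>
    have hc := mem_newlyB_nonneg n g c (by rw [hnew]; simp)
    have h1 := pvZeros_set g c.1 c.2 hc.1 hc.2.1 hc.2.2
    have h2 := pvZeros_markB_le cs (pvSet g c.1 c.2)
      (fun c' hc' => (mem_newlyB_nonneg n g c' (by rw [hnew]; exact List.mem_cons_of_mem _ hc')).1)
    simp only [markB, List.foldl_cons]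
    simp only [markB] at h2
    omega

-- 'answer = 0; while True: newly = [...]; if not newly: return answer; mark; answer += 1'
def loopB (n : Int) (g : List (List Int)) (ans : Int) : Int :=
  if hq : newlyB n g = [] then ans
  else loopB n (markB g (newlyB n g)) (ans + 1)
termination_by pvZeros g
decreasing_by exact loopB_dec n g hq

def solution_alt (n : Int) (garden : List (List Int)) : Int :=
  loopB n garden 0

-- ===== PRECONDITION & SPEC =====
-- Pre_ excludes exactly the inputs on which Python A (and B) raises IndexError: when
-- n ≥ 1 the initial scan reads garden[i][j] for every i,j < n, so it needs at least n
-- rows whose first n each have length ≥ n (all later accesses also stay in [0,n)²).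
def Pre_solution (n : Int) (garden : List (List Int)) : Prop :=
  n ≤ 0 ∨ (n ≤ (garden.length : Int) ∧ ∀ row ∈ garden.take n.toNat, n ≤ (row.length : Int))
instance (n : Int) (garden : List (List Int)) : Decidable (Pre_solution n garden) := by unfold Pre_solution; infer_instance

def pvWitness_solution : Int × List (List Int) := (2, [[1, 0], [0, 0]])

def Spec_solution (n : Int) (garden : List (List Int)) (out : Int) : Prop := out = solution_alt n garden
instance (n : Int) (garden : List (List Int)) (out : Int) : Decidable (Spec_solution n garden out) := by unfold Spec_solution; infer_instance

-- ===== CLAIM (what is proved, stated in full; the proofs are below) =====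
def Claim_equal_solution : Prop := ∀ (n : Int) (garden : List (List Int)), Dom_solution n garden → Pre_solution n garden → Spec_solution n garden (solution n garden)

-- ===== LEMMAS AND PROOFS =====

-- 4-neighbour adjacency (a symmetric relation); abbrev so its Decidable instance is found
abbrev adjTo (cx cy a b : Int) : Prop :=
  (a = cx + 1 ∧ b = cy) ∨ (a = cx + -1 ∧ b = cy) ∨ (a = cx ∧ b = cy + 1) ∨ (a = cx ∧ b = cy + -1)

theorem adjTo_symm (x y a b : Int) (h : adjTo x y a b) : adjTo a b x y := by
  unfold adjTo at *
  omega

-- the frontier-expansion predicate: (a,b) is an in-range 0-cell of g adjacent to a cell of cs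
abbrev Padj (n : Int) (g : List (List Int)) (cs : List (Int × Int)) (a b : Int) : Prop :=
  0 ≤ a ∧ a < n ∧ 0 ≤ b ∧ b < n ∧ pvCell g a b = 0 ∧ ∃ c ∈ cs, adjTo c.1 c.2 a b

theorem Padj_cons (n : Int) (g : List (List Int)) (c : Int × Int) (cs : List (Int × Int)) (a b : Int) :
    Padj n g (c :: cs) a b ↔ Padj n g [c] a b ∨ Padj n g cs a b := by
  unfold Padj
  constructor
  · rintro ⟨u1, u2, u3, u4, u5, c', hc', hadj⟩
    rcases List.mem_cons.mp hc' with rfl | hm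
    · exact Or.inl ⟨u1, u2, u3, u4, u5, c', by simp, hadj⟩
    · exact Or.inr ⟨u1, u2, u3, u4, u5, c', hm, hadj⟩
  · rintro (⟨u1, u2, u3, u4, u5, c', hc', hadj⟩ | ⟨u1, u2, u3, u4, u5, c', hc', hadj⟩)
    · simp only [List.mem_singleton] at hc'
      subst hc'
      exact ⟨u1, u2, u3, u4, u5, c', by simp, hadj⟩
    · exact ⟨u1, u2, u3, u4, u5, c', List.mem_cons_of_mem _ hc', hadj⟩

theorem exists_dirs_adjTo (u v a b : Int) :
    (∃ dd ∈ ([((1 : Int), (0 : Int)), (-1, 0), (0, 1), (0, -1)] : List (Int × Int)),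
      a = u + dd.1 ∧ b = v + dd.2) ↔ adjTo u v a b := by
  constructor
  · rintro ⟨dd, hm, h1, h2⟩
    simp only [List.mem_cons, List.not_mem_nil, or_false] at hm
    unfold adjTo
    rcases hm with rfl | rfl | rfl | rfl <;> simp_all <;> omega
  · intro h
    unfold adjTo at h
    rcases h with ⟨rfl, rfl⟩ | ⟨rfl, rfl⟩ | ⟨rfl, rfl⟩ | ⟨rfl, rfl⟩
    · exact ⟨(1, 0), by simp, by simp, by simp⟩
    · exact ⟨(-1, 0), by simp, by simp, by simp⟩
    · exact ⟨(0, 1), by simp, by simp, by simp⟩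
    · exact ⟨(0, -1), by simp, by simp, by simp⟩

-- pointwise behaviour of pvSet (only at nonnegative coordinates, the only ones queried)
theorem pvCell_pvSet_self (g : List (List Int)) (x y : Int) (hx : 0 ≤ x) (hy : 0 ≤ y) :
    pvCell (pvSet g x y) x y = 1 := by
  unfold pvCell pvSet
  rw [PySem.List.pyGet?_of_nonneg g hx, PySem.List.pyGet?_of_nonneg _ hx]
  cases hrow : g[x.toNat]? with
  | none =>
    rw [List.set_eq_of_length_le (List.getElem?_eq_none_iff.mp hrow), hrow]
    simp [PySem.List.pyGet?]
  | some row =>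
    have hlt : x.toNat < g.length := by
      by_contra hcon
      rw [List.getElem?_eq_none_iff.2 (by omega)] at hrow
      simp at hrow
    simp only [Option.getD_some]
    rw [List.getElem?_set_self hlt]
    simp only [Option.getD_some]
    rw [PySem.List.pyGet?_of_nonneg _ hy]
    by_cases hylt : y.toNat < row.length
    · rw [List.getElem?_set_self hylt]
      simp
    · rw [List.getElem?_eq_none_iff.2 (by rw [List.length_set]; omega)]
      simp

theorem pvCell_pvSet_other (g : List (List Int)) (x y a b : Int) (hx : 0 ≤ x) (hy : 0 ≤ y)
    (ha : 0 ≤ a) (hb : 0 ≤ b) (hne : ¬(a = x ∧ b = y)) :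
    pvCell (pvSet g x y) a b = pvCell g a b := by
  unfold pvCell pvSet
  rw [PySem.List.pyGet?_of_nonneg g hx, PySem.List.pyGet?_of_nonneg _ ha,
    PySem.List.pyGet?_of_nonneg g ha]
  by_cases hax : a = x
  · subst hax
    have hby : b ≠ y := fun h => hne ⟨rfl, h⟩
    cases hrow : g[a.toNat]? with
    | none =>
      rw [List.set_eq_of_length_le (List.getElem?_eq_none_iff.mp hrow), hrow]
    | some row =>
      have hlt : a.toNat < g.length := by
        by_contra hcon
        rw [List.getElem?_eq_none_iff.2 (by omega)] at hrow
        simp at hrow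
      simp only [Option.getD_some]
      rw [List.getElem?_set_self hlt]
      simp only [Option.getD_some]
      rw [PySem.List.pyGet?_of_nonneg _ hb, PySem.List.pyGet?_of_nonneg _ hb,
        List.getElem?_set_ne (show y.toNat ≠ b.toNat by omega)]
  · rw [List.getElem?_set_ne (show x.toNat ≠ a.toNat by omega)]

-- characterisation of one popped cell's direction scan (port A's inner loop)
theorem stepDirs_char (n x y : Int) (ds : List (Int × Int)) : ∀ (g : List (List Int)),
    (∀ a b : Int, 0 ≤ a → 0 ≤ b →
      pvCell (stepDirs n x y ds g).1 a b =
        if (∃ dd ∈ ds, a = x + dd.1 ∧ b = y + dd.2) ∧ a < n ∧ b < n ∧ pvCell g a b = 0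
        then 1 else pvCell g a b)
    ∧ (∀ a b : Int, (a, b) ∈ (stepDirs n x y ds g).2 ↔
        ((∃ dd ∈ ds, a = x + dd.1 ∧ b = y + dd.2) ∧ 0 ≤ a ∧ a < n ∧ 0 ≤ b ∧ b < n ∧ pvCell g a b = 0)) := by
  induction ds with
  | nil =>
    intro g
    constructor
    · intro a b _ _; simp [stepDirs]
    · intro a b; simp [stepDirs]
  | cons dd ds ih =>
    intro g
    by_cases hc : 0 ≤ x + dd.1 ∧ x + dd.1 < n ∧ 0 ≤ y + dd.2 ∧ y + dd.2 < n ∧ pvCell g (x + dd.1) (y + dd.2) = 0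
    · obtain ⟨ihv, ihm⟩ := ih (pvSet g (x + dd.1) (y + dd.2))
      have hself : pvCell (pvSet g (x + dd.1) (y + dd.2)) (x + dd.1) (y + dd.2) = 1 :=
        pvCell_pvSet_self g _ _ hc.1 hc.2.2.1
      constructor
      · intro a b ha hb
        rw [stepDirs_cons_pos n x y dd ds g hc]
        dsimp only
        rw [ihv a b ha hb]
        by_cases hT : a = x + dd.1 ∧ b = y + dd.2
        · obtain ⟨rfl, rfl⟩ := hT
          rw [hself, ite_self,
            if_pos ⟨⟨dd, by simp, rfl, rfl⟩, hc.2.1, hc.2.2.2.1, hc.2.2.2.2⟩]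
        · have hcell : pvCell (pvSet g (x + dd.1) (y + dd.2)) a b = pvCell g a b :=
            pvCell_pvSet_other g _ _ a b hc.1 hc.2.2.1 ha hb hT
          rw [hcell]
          have hiff : ((∃ dd' ∈ ds, a = x + dd'.1 ∧ b = y + dd'.2) ∧ a < n ∧ b < n ∧ pvCell g a b = 0)
              ↔ ((∃ dd' ∈ dd :: ds, a = x + dd'.1 ∧ b = y + dd'.2) ∧ a < n ∧ b < n ∧ pvCell g a b = 0) := by
            constructor
            · rintro ⟨⟨dd', hm, he⟩, h2, h3, h4⟩
              exact ⟨⟨dd', List.mem_cons_of_mem _ hm, he⟩, h2, h3, h4⟩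
            · rintro ⟨⟨dd', hm, he⟩, h2, h3, h4⟩
              rcases List.mem_cons.mp hm with rfl | hm'
              · exact absurd he hT
              · exact ⟨⟨dd', hm', he⟩, h2, h3, h4⟩
          rw [if_congr hiff rfl rfl]
      · intro a b
        rw [stepDirs_cons_pos n x y dd ds g hc]
        dsimp only
        rw [List.mem_cons, ihm a b]
        constructor
        · rintro (heq | hPm)
          · injection heq with h1 h2
            subst h1; subst h2
            exact ⟨⟨dd, by simp, rfl, rfl⟩, hc.1, hc.2.1, hc.2.2.1, hc.2.2.2.1, hc.2.2.2.2⟩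
          · obtain ⟨⟨dd', hm, he⟩, u1, u2, u3, u4, u5⟩ := hPm
            have hT : ¬(a = x + dd.1 ∧ b = y + dd.2) := by
              rintro ⟨rfl, rfl⟩
              rw [hself] at u5
              exact one_ne_zero u5
            have hcell := pvCell_pvSet_other g _ _ a b hc.1 hc.2.2.1 u1 u3 hT
            rw [hcell] at u5
            exact ⟨⟨dd', List.mem_cons_of_mem _ hm, he⟩, u1, u2, u3, u4, u5⟩
        · rintro ⟨⟨dd', hm, he⟩, u1, u2, u3, u4, u5⟩
          by_cases hT : a = x + dd.1 ∧ b = y + dd.2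
          · left; rw [hT.1, hT.2]
          · right
            rcases List.mem_cons.mp hm with rfl | hm'
            · exact absurd he hT
            · have hcell := pvCell_pvSet_other g _ _ a b hc.1 hc.2.2.1 u1 u3 hT
              exact ⟨⟨dd', hm', he⟩, u1, u2, u3, u4, by rw [hcell]; exact u5⟩
    · obtain ⟨ihv, ihm⟩ := ih g
      constructor
      · intro a b ha hb
        rw [stepDirs_cons_neg n x y dd ds g hc, ihv a b ha hb]
        have hiff : ((∃ dd' ∈ ds, a = x + dd'.1 ∧ b = y + dd'.2) ∧ a < n ∧ b < n ∧ pvCell g a b = 0)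
            ↔ ((∃ dd' ∈ dd :: ds, a = x + dd'.1 ∧ b = y + dd'.2) ∧ a < n ∧ b < n ∧ pvCell g a b = 0) := by
          constructor
          · rintro ⟨⟨dd', hm, he⟩, h2, h3, h4⟩
            exact ⟨⟨dd', List.mem_cons_of_mem _ hm, he⟩, h2, h3, h4⟩
          · rintro ⟨⟨dd', hm, he⟩, h2, h3, h4⟩
            rcases List.mem_cons.mp hm with rfl | hm'
            · exact absurd ⟨he.1 ▸ ha, he.1 ▸ h2, he.2 ▸ hb, he.2 ▸ h3, he.1 ▸ he.2 ▸ h4⟩ hc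
            · exact ⟨⟨dd', hm', he⟩, h2, h3, h4⟩
        rw [if_congr hiff rfl rfl]
      · intro a b
        rw [stepDirs_cons_neg n x y dd ds g hc, ihm a b]
        constructor
        · rintro ⟨⟨dd', hm, he⟩, u⟩
          exact ⟨⟨dd', List.mem_cons_of_mem _ hm, he⟩, u⟩
        · rintro ⟨⟨dd', hm, he⟩, u1, u2, u3, u4, u5⟩
          rcases List.mem_cons.mp hm with rfl | hm'
          · exact absurd ⟨he.1 ▸ u1, he.1 ▸ u2, he.2 ▸ u3, he.2 ▸ u4, he.1 ▸ he.2 ▸ u5⟩ hc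
          · exact ⟨⟨dd', hm', he⟩, u1, u2, u3, u4, u5⟩

theorem mem_stepCellA (n : Int) (g : List (List Int)) (c : Int × Int) (a b : Int) :
    (a, b) ∈ (stepCellA n g c.1 c.2).2 ↔ Padj n g [c] a b := by
  unfold stepCellA
  rw [(stepDirs_char n c.1 c.2 _ g).2 a b]
  constructor
  · rintro ⟨hex, h1, h2, h3, h4, h5⟩
    exact ⟨h1, h2, h3, h4, h5, c, by simp, (exists_dirs_adjTo c.1 c.2 a b).1 hex⟩
  · rintro ⟨h1, h2, h3, h4, h5, c', hc', hadj⟩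
    simp only [List.mem_singleton] at hc'
    subst hc'
    exact ⟨(exists_dirs_adjTo c'.1 c'.2 a b).2 hadj, h1, h2, h3, h4, h5⟩

theorem cell_stepCellA (n : Int) (g : List (List Int)) (c : Int × Int) (a b : Int)
    (ha : 0 ≤ a) (hb : 0 ≤ b) :
    pvCell (stepCellA n g c.1 c.2).1 a b = if Padj n g [c] a b then 1 else pvCell g a b := by
  unfold stepCellA
  rw [(stepDirs_char n c.1 c.2 _ g).1 a b ha hb]
  by_cases hP : Padj n g [c] a b
  · rw [if_pos hP, if_pos]
    obtain ⟨h1, h2, h3, h4, h5, c', hc', hadj⟩ := hP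
    simp only [List.mem_singleton] at hc'
    subst hc'
    exact ⟨(exists_dirs_adjTo c'.1 c'.2 a b).2 hadj, h2, h4, h5⟩
  · rw [if_neg hP, if_neg]
    rintro ⟨hex, h2, h4, h5⟩
    exact hP ⟨ha, h2, hb, h4, h5, c, by simp, (exists_dirs_adjTo c.1 c.2 a b).1 hex⟩

-- characterisation of one whole level (port A's round) in terms of Padj
theorem stepLevelA_char (n : Int) (L : List (Int × Int)) : ∀ (g : List (List Int)),
    (∀ a b : Int, 0 ≤ a → 0 ≤ b →
      pvCell (stepLevelA n g L).1 a b = if Padj n g L a b then 1 else pvCell g a b)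
    ∧ (∀ a b : Int, (a, b) ∈ (stepLevelA n g L).2 ↔ Padj n g L a b) := by
  induction L with
  | nil =>
    intro g
    constructor
    · intro a b _ _; simp [stepLevelA, Padj]
    · intro a b; simp [stepLevelA, Padj]
  | cons c cs ih =>
    intro g
    obtain ⟨ihv, ihm⟩ := ih (stepCellA n g c.1 c.2).1
    constructor
    · intro a b ha hb
      have hstep : pvCell (stepLevelA n g (c :: cs)).1 a b
          = pvCell (stepLevelA n (stepCellA n g c.1 c.2).1 cs).1 a b := rfl
      rw [hstep, ihv a b ha hb]
      by_cases h1 : Padj n g [c] a b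
      · have hg1 : pvCell (stepCellA n g c.1 c.2).1 a b = 1 := by
          rw [cell_stepCellA n g c a b ha hb, if_pos h1]
        have hnP : ¬ Padj n (stepCellA n g c.1 c.2).1 cs a b := by
          rintro ⟨_, _, _, _, h0, _⟩
          rw [hg1] at h0
          exact one_ne_zero h0
        rw [if_neg hnP, hg1, if_pos ((Padj_cons n g c cs a b).2 (Or.inl h1))]
      · have hgeq : pvCell (stepCellA n g c.1 c.2).1 a b = pvCell g a b := by
          rw [cell_stepCellA n g c a b ha hb, if_neg h1]
        by_cases h2 : Padj n g cs a b
        · have hP : Padj n (stepCellA n g c.1 c.2).1 cs a b := by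
            obtain ⟨u1, u2, u3, u4, u5, u6⟩ := h2
            exact ⟨u1, u2, u3, u4, by rw [hgeq]; exact u5, u6⟩
          rw [if_pos hP, if_pos ((Padj_cons n g c cs a b).2 (Or.inr h2))]
        · have hnP : ¬ Padj n (stepCellA n g c.1 c.2).1 cs a b := by
            rintro ⟨u1, u2, u3, u4, u5, u6⟩
            exact h2 ⟨u1, u2, u3, u4, by rw [← hgeq]; exact u5, u6⟩
          rw [if_neg hnP, hgeq, if_neg]
          intro hP
          rcases (Padj_cons n g c cs a b).1 hP with h | h
          · exact h1 h
          · exact h2 h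
    · intro a b
      have hstep : ((a, b) ∈ (stepLevelA n g (c :: cs)).2) ↔
          ((a, b) ∈ (stepCellA n g c.1 c.2).2 ++ (stepLevelA n (stepCellA n g c.1 c.2).1 cs).2) :=
        Iff.rfl
      rw [hstep, List.mem_append, mem_stepCellA n g c a b, ihm a b, Padj_cons n g c cs a b]
      constructor
      · rintro (h | h)
        · exact Or.inl h
        · by_cases h1 : Padj n g [c] a b
          · exact Or.inl h1
          · obtain ⟨u1, u2, u3, u4, u5, u6⟩ := h
            have hgeq : pvCell (stepCellA n g c.1 c.2).1 a b = pvCell g a b := by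
              rw [cell_stepCellA n g c a b u1 u3, if_neg h1]
            exact Or.inr ⟨u1, u2, u3, u4, by rw [← hgeq]; exact u5, u6⟩
      · rintro (h | h)
        · exact Or.inl h
        · by_cases h1 : Padj n g [c] a b
          · exact Or.inl h1
          · obtain ⟨u1, u2, u3, u4, u5, u6⟩ := h
            have hgeq : pvCell (stepCellA n g c.1 c.2).1 a b = pvCell g a b := by
              rw [cell_stepCellA n g c a b u1 u3, if_neg h1]
            exact Or.inr ⟨u1, u2, u3, u4, by rw [hgeq]; exact u5, u6⟩

-- pointwise behaviour of port B's marking pass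
theorem markB_char (cs : List (Int × Int)) : ∀ (g : List (List Int)),
    (∀ c ∈ cs, 0 ≤ c.1 ∧ 0 ≤ c.2) →
    ∀ a b : Int, 0 ≤ a → 0 ≤ b →
      pvCell (markB g cs) a b = if (a, b) ∈ cs then 1 else pvCell g a b := by
  induction cs with
  | nil => intro g _ a b _ _; simp [markB]
  | cons c cs ih =>
    intro g hcs a b ha hb
    have hmark : markB g (c :: cs) = markB (pvSet g c.1 c.2) cs := rfl
    rw [hmark, ih (pvSet g c.1 c.2) (fun c' hc' => hcs c' (List.mem_cons_of_mem _ hc')) a b ha hb]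
    have hc0 := hcs c (by simp)
    by_cases hm : (a, b) ∈ cs
    · rw [if_pos hm, if_pos (List.mem_cons_of_mem _ hm)]
    · rw [if_neg hm]
      by_cases he : (a, b) = c
      · have h1 : a = c.1 := by rw [← he]
        have h2 : b = c.2 := by rw [← he]
        rw [if_pos (by rw [he]; simp), h1, h2, pvCell_pvSet_self _ _ _ hc0.1 hc0.2]
      · have hne : ¬(a = c.1 ∧ b = c.2) := fun h => he (by rw [h.1, h.2])
        rw [if_neg (fun h => (List.mem_cons.mp h).elim he hm),
          pvCell_pvSet_other g c.1 c.2 a b hc0.1 hc0.2 ha hb hne]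

-- membership in the comprehension's output
theorem hasNbrOne_iff (n : Int) (g : List (List Int)) (a b : Int) :
    hasNbrOne n g a b = true ↔
      ∃ x y : Int, adjTo a b x y ∧ 0 ≤ x ∧ x < n ∧ 0 ≤ y ∧ y < n ∧ pvCell g x y = 1 := by
  unfold hasNbrOne
  rw [List.any_eq_true]
  constructor
  · rintro ⟨c, hc, hf⟩
    simp only [Bool.and_eq_true, decide_eq_true_eq, beq_iff_eq] at hf
    refine ⟨c.1, c.2, ?_, hf.1.1.1.1, hf.1.1.1.2, hf.1.1.2, hf.1.2, hf.2⟩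
    simp only [List.mem_cons, List.not_mem_nil, or_false] at hc
    unfold adjTo
    rcases hc with rfl | rfl | rfl | rfl <;> simp <;> omega
  · rintro ⟨x, y, hadj, hx, hxn, hy, hyn, h1⟩
    refine ⟨(x, y), ?_, ?_⟩
    · simp only [List.mem_cons, Prod.mk.injEq, List.not_mem_nil, or_false]
      unfold adjTo at hadj
      omega
    · simp only [Bool.and_eq_true, decide_eq_true_eq, beq_iff_eq]
      exact ⟨⟨⟨⟨hx, hxn⟩, hy⟩, hyn⟩, h1⟩

theorem mem_newlyB (n : Int) (g : List (List Int)) (a b : Int) :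
    (a, b) ∈ newlyB n g ↔
      0 ≤ a ∧ a < n ∧ 0 ≤ b ∧ b < n ∧ pvCell g a b = 0 ∧ hasNbrOne n g a b = true := by
  unfold newlyB
  simp only [List.mem_flatMap, List.mem_map, List.mem_filter, PySem.List.mem_pyRange_one,
    Bool.and_eq_true, beq_iff_eq]
  constructor
  · rintro ⟨i, hi, j, ⟨hj, h0, hnb⟩, heq⟩
    injection heq with e1 e2
    subst e1; subst e2
    exact ⟨hi.1, hi.2, hj.1, hj.2, h0, hnb⟩
  · rintro ⟨ha, han, hb, hbn, h0, hnb⟩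
    exact ⟨a, ⟨ha, han⟩, b, ⟨⟨hb, hbn⟩, h0, hnb⟩, rfl⟩

-- grid shapes and extensionality
def gridShape (g : List (List Int)) : List Nat := g.map List.length

theorem set_getElem?_self {α : Type} (l : List α) (i : Nat) (v : α) (h : l[i]? = some v) :
    l.set i v = l := by
  induction l generalizing i with
  | nil => simp at h
  | cons hd tl ih =>
    cases i with
    | zero => simp at h; simp [h]
    | succ k => simp at h; simp [ih k h]

theorem gridShape_pvSet (g : List (List Int)) (x y : Int) (hx : 0 ≤ x) :
    gridShape (pvSet g x y) = gridShape g := by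
  unfold pvSet gridShape
  rw [PySem.List.pyGet?_of_nonneg g hx]
  cases hrow : g[x.toNat]? with
  | none => rw [List.set_eq_of_length_le (List.getElem?_eq_none_iff.mp hrow)]
  | some row =>
    simp only [Option.getD_some]
    rw [List.map_set]
    apply set_getElem?_self
    simp [hrow]

theorem gridShape_stepDirs (n x y : Int) (ds : List (Int × Int)) : ∀ (g : List (List Int)),
    gridShape (stepDirs n x y ds g).1 = gridShape g := by
  induction ds with
  | nil => intro g; simp [stepDirs]
  | cons dd ds ih =>
    intro g
    by_cases h : 0 ≤ x + dd.1 ∧ x + dd.1 < n ∧ 0 ≤ y + dd.2 ∧ y + dd.2 < n ∧ pvCell g (x + dd.1) (y + dd.2) = 0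
    · rw [stepDirs_cons_pos n x y dd ds g h]
      dsimp only
      rw [ih (pvSet g (x + dd.1) (y + dd.2)), gridShape_pvSet g _ _ h.1]
    · rw [stepDirs_cons_neg n x y dd ds g h]
      exact ih g

theorem gridShape_stepLevelA (n : Int) (L : List (Int × Int)) : ∀ (g : List (List Int)),
    gridShape (stepLevelA n g L).1 = gridShape g := by
  induction L with
  | nil => intro g; rfl
  | cons c cs ih =>
    intro g
    have hstep : gridShape (stepLevelA n g (c :: cs)).1
        = gridShape (stepLevelA n (stepCellA n g c.1 c.2).1 cs).1 := rfl
    rw [hstep, ih (stepCellA n g c.1 c.2).1]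
    exact gridShape_stepDirs n c.1 c.2 _ g

theorem gridShape_markB (cs : List (Int × Int)) : ∀ (g : List (List Int)),
    (∀ c ∈ cs, 0 ≤ c.1) → gridShape (markB g cs) = gridShape g := by
  induction cs with
  | nil => intro g _; rfl
  | cons c cs ih =>
    intro g h
    have hmark : markB g (c :: cs) = markB (pvSet g c.1 c.2) cs := rfl
    rw [hmark, ih (pvSet g c.1 c.2) (fun c' hc' => h c' (List.mem_cons_of_mem _ hc')),
      gridShape_pvSet g _ _ (h c (by simp))]

theorem pvCell_natCast (g : List (List Int)) (i j : Nat) (hi : i < g.length)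
    (hj : j < g[i].length) : pvCell g (i : Int) (j : Int) = g[i][j] := by
  unfold pvCell
  simp only [PySem.List.pyGet?_natCast]
  rw [List.getElem?_eq_getElem hi]
  simp only [Option.getD_some]
  rw [List.getElem?_eq_getElem hj]
  simp only [Option.getD_some]

theorem grid_ext (g1 g2 : List (List Int)) (hs : gridShape g1 = gridShape g2)
    (h : ∀ a b : Int, 0 ≤ a → 0 ≤ b → pvCell g1 a b = pvCell g2 a b) : g1 = g2 := by
  have hlen : g1.length = g2.length := by
    have := congrArg List.length hs
    simpa [gridShape] using this
  apply List.ext_getElem hlen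
  intro i hi1 hi2
  have hrow : g1[i].length = g2[i].length := by
    have h2 : (gridShape g1)[i]? = (gridShape g2)[i]? := by rw [hs]
    unfold gridShape at h2
    rw [List.getElem?_map, List.getElem?_map, List.getElem?_eq_getElem hi1,
      List.getElem?_eq_getElem hi2] at h2
    simpa using h2
  apply List.ext_getElem hrow
  intro j hj1 hj2
  have hcell := h (i : Int) (j : Int) (Int.natCast_nonneg i) (Int.natCast_nonneg j)
  rw [pvCell_natCast g1 i j hi1 hj1, pvCell_natCast g2 i j hi2 hj2] at hcell
  exact hcell

-- the BFS invariant: frontier cells are in-range 1-cells, all other 1-cells are saturated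
def INV (n : Int) (g : List (List Int)) (L : List (Int × Int)) : Prop :=
  (∀ c ∈ L, 0 ≤ c.1 ∧ c.1 < n ∧ 0 ≤ c.2 ∧ c.2 < n ∧ pvCell g c.1 c.2 = 1) ∧
  (∀ x y a b : Int, 0 ≤ x → x < n → 0 ≤ y → y < n → pvCell g x y = 1 → (x, y) ∉ L →
    adjTo x y a b → 0 ≤ a → a < n → 0 ≤ b → b < n → pvCell g a b ≠ 0)

-- under the invariant, B's scan finds exactly the cells adjacent to A's frontier
theorem newlyB_eq_Padj (n : Int) (g : List (List Int)) (L : List (Int × Int))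
    (hinv : INV n g L) (a b : Int) : (a, b) ∈ newlyB n g ↔ Padj n g L a b := by
  rw [mem_newlyB]
  constructor
  · rintro ⟨ha, han, hb, hbn, h0, hnb⟩
    obtain ⟨x, y, hadj, hx, hxn, hy, hyn, h1⟩ := (hasNbrOne_iff n g a b).1 hnb
    refine ⟨ha, han, hb, hbn, h0, ?_⟩
    by_cases hmem : (x, y) ∈ L
    · exact ⟨(x, y), hmem, adjTo_symm a b x y hadj⟩
    · exact absurd h0 (hinv.2 x y a b hx hxn hy hyn h1 hmem (adjTo_symm a b x y hadj) ha han hb hbn)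
  · rintro ⟨ha, han, hb, hbn, h0, c, hc, hadj⟩
    have hcI := hinv.1 c hc
    exact ⟨ha, han, hb, hbn, h0, (hasNbrOne_iff n g a b).2
      ⟨c.1, c.2, adjTo_symm c.1 c.2 a b hadj, hcI.1, hcI.2.1, hcI.2.2.1, hcI.2.2.2.1, hcI.2.2.2.2⟩⟩

-- the invariant survives one round
theorem INV_step (n : Int) (g : List (List Int)) (L : List (Int × Int)) (hinv : INV n g L) :
    INV n (stepLevelA n g L).1 (stepLevelA n g L).2 := by
  obtain ⟨hval, hmem⟩ := stepLevelA_char n L g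
  constructor
  · intro c hc
    have hP := (hmem c.1 c.2).1 (by simpa using hc)
    refine ⟨hP.1, hP.2.1, hP.2.2.1, hP.2.2.2.1, ?_⟩
    rw [hval c.1 c.2 hP.1 hP.2.2.1, if_pos hP]
  · intro x y a b hx hxn hy hyn h1 hnotmem hadj ha han hb hbn h0
    rw [hval a b ha hb] at h0
    have hPa : ¬ Padj n g L a b := by
      intro hP
      rw [if_pos hP] at h0
      exact one_ne_zero h0
    rw [if_neg hPa] at h0
    rw [hval x y hx hy] at h1
    have hPx : ¬ Padj n g L x y := fun hP => hnotmem ((hmem x y).2 hP)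
    rw [if_neg hPx] at h1
    by_cases hxyL : (x, y) ∈ L
    · exact hPa ⟨ha, han, hb, hbn, h0, (x, y), hxyL, hadj⟩
    · exact hinv.2 x y a b hx hxn hy hyn h1 hxyL hadj ha han hb hbn h0

-- one round of A produces the same grid as one round of B
theorem grids_agree (n : Int) (g : List (List Int)) (L : List (Int × Int)) (hinv : INV n g L) :
    (stepLevelA n g L).1 = markB g (newlyB n g) := by
  have hnn : ∀ c ∈ newlyB n g, 0 ≤ c.1 ∧ 0 ≤ c.2 := fun c hc =>
    ⟨(mem_newlyB_nonneg n g c hc).1, (mem_newlyB_nonneg n g c hc).2.1⟩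
  apply grid_ext
  · rw [gridShape_stepLevelA, gridShape_markB _ _ (fun c hc => (hnn c hc).1)]
  · intro a b ha hb
    rw [(stepLevelA_char n L g).1 a b ha hb, markB_char (newlyB n g) g hnn a b ha hb]
    by_cases hP : Padj n g L a b
    · rw [if_pos hP, if_pos ((newlyB_eq_Padj n g L hinv a b).2 hP)]
    · rw [if_neg hP, if_neg (fun hm => hP ((newlyB_eq_Padj n g L hinv a b).1 hm))]

theorem newlyB_nil_of_inv (n : Int) (g : List (List Int)) (hinv : INV n g []) :
    newlyB n g = [] := by
  rw [List.eq_nil_iff_forall_not_mem]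
  intro c hc
  have hP := (newlyB_eq_Padj n g [] hinv c.1 c.2).1 (by simpa using hc)
  obtain ⟨_, _, _, _, _, c', hc', _⟩ := hP
  simp at hc'

-- the main bridge: from any invariant state the two loops return the same answer
theorem loop_agree (n : Int) (k : Nat) : ∀ (g : List (List Int)) (L : List (Int × Int)) (d : Int),
    pvZeros g + L.length ≤ k → INV n g L → loopA n g L d = loopB n g d := by
  induction k with
  | zero =>
    intro g L d hk hinv
    have hL : L = [] := by
      cases L with
      | nil => rfl
      | cons c cs => simp [List.length_cons] at hk
    subst hL
    rw [loopA, dif_pos rfl, loopB, dif_pos (newlyB_nil_of_inv n g hinv)]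
  | succ k ih =>
    intro g L d hk hinv
    by_cases hL : L = []
    · subst hL
      rw [loopA, dif_pos rfl, loopB, dif_pos (newlyB_nil_of_inv n g hinv)]
    · have hmemiff : ∀ a b : Int, (a, b) ∈ newlyB n g ↔ (a, b) ∈ (stepLevelA n g L).2 :=
        fun a b => (newlyB_eq_Padj n g L hinv a b).trans ((stepLevelA_char n L g).2 a b).symm
      by_cases hr2 : (stepLevelA n g L).2 = []
      · have hnew : newlyB n g = [] := by
          rw [List.eq_nil_iff_forall_not_mem]
          intro c hc
          have := (hmemiff c.1 c.2).1 (by simpa using hc)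
          rw [hr2] at this
          simp at this
        rw [loopA, dif_neg hL, if_pos hr2, loopB, dif_pos hnew]
      · have hnew : newlyB n g ≠ [] := by
          intro h
          apply hr2
          rw [List.eq_nil_iff_forall_not_mem]
          intro c hc
          have := (hmemiff c.1 c.2).2 (by simpa using hc)
          rw [h] at this
          simp at this
        rw [loopA, dif_neg hL, if_neg hr2, loopB, dif_neg hnew, ← grids_agree n g L hinv]
        have hlen : 1 ≤ L.length := by
          cases L with
          | nil => exact absurd rfl hL
          | cons a t => simp
        have hz := pvZeros_stepLevel n L g
        exact ih (stepLevelA n g L).1 (stepLevelA n g L).2 (d + 1) (by omega) (INV_step n g L hinv)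

-- the seeding scan collects exactly the in-range 1-cells
theorem seedA_flat (n : Int) (g : List (List Int)) :
    seedA n g = (PySem.List.pyRange 0 n 1).flatMap (fun i =>
      ((PySem.List.pyRange 0 n 1).filter (fun j => pvCell g i j == 1)).map (fun j => (i, j))) := by
  unfold seedA
  have hinner : ∀ (i : Int) (acc : List (Int × Int)),
      (PySem.List.pyRange 0 n 1).foldl (fun acc2 j =>
        if pvCell g i j == 1 then acc2 ++ [(i, j)] else acc2) acc
      = acc ++ ((PySem.List.pyRange 0 n 1).filter (fun j => pvCell g i j == 1)).map (fun j => (i, j)) := by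
    intro i acc
    exact PySem.List.foldl_append_if (fun j => pvCell g i j == 1) (fun j => (i, j)) _ _
  simp only [hinner]
  have := PySem.List.foldl_append_eq_flatMap
    (fun i => ((PySem.List.pyRange 0 n 1).filter (fun j => pvCell g i j == 1)).map (fun j => (i, j)))
    (PySem.List.pyRange 0 n 1) ([] : List (Int × Int))
  simpa using this

theorem mem_seedA (n : Int) (g : List (List Int)) (a b : Int) :
    (a, b) ∈ seedA n g ↔ 0 ≤ a ∧ a < n ∧ 0 ≤ b ∧ b < n ∧ pvCell g a b = 1 := by
  rw [seedA_flat]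
  simp only [List.mem_flatMap, List.mem_map, List.mem_filter, PySem.List.mem_pyRange_one,
    beq_iff_eq]
  constructor
  · rintro ⟨i, hi, j, ⟨hj, h1⟩, heq⟩
    injection heq with e1 e2
    subst e1; subst e2
    exact ⟨hi.1, hi.2, hj.1, hj.2, h1⟩
  · rintro ⟨ha, han, hb, hbn, h1⟩
    exact ⟨a, ⟨ha, han⟩, b, ⟨⟨hb, hbn⟩, h1⟩, rfl⟩

theorem INV_init (n : Int) (g : List (List Int)) : INV n g (seedA n g) := by
  constructor
  · intro c hc
    exact (mem_seedA n g c.1 c.2).1 (by simpa using hc)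
  · intro x y a b hx hxn hy hyn h1 hmem _ _ _ _ _
    exact absurd ((mem_seedA n g x y).2 ⟨hx, hxn, hy, hyn, h1⟩) hmem

-- ===== VERDICT (by name: the statement is the Claim_ definition above) =====
theorem solution_spec : Claim_equal_solution := by
  intro n garden _ _
  unfold Spec_solution solution solution_alt
  exact loop_agree n (pvZeros garden + (seedA n garden).length) garden (seedA n garden) 0
    le_rfl (INV_init n garden)
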